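-- pv_equiv track=rewrite | github.com/PamelaPajarillo/HEPQIS-LivingReview | utils.py | get_author_list
-- ===== SOURCE A (Python) =====
-- def get_author_list(metadata_arxiv, metadata_doi):
--     if len(metadata_arxiv) != 0:
--         if 'authors' in metadata_arxiv.keys():
--             author_list = ""
--             if len(metadata_arxiv['authors']) == 1:
--                 return metadata_arxiv['authors'][0]['full_name']
--             else:
--                 for i in metadata_arxiv['authors']:
--                     author_list += i['full_name'] + " and "
--                 return author_list[:-5]
--         else:
--             return 'nan'
--     elif len(metadata_doi) != 0:
--         if 'authors' in metadata_doi.keys():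
--             author_list = ""
--             if len(metadata_doi['authors']) == 1:
--                 return metadata_doi['authors'][0]['full_name']
--             else:
--                 for i in metadata_doi['authors']:
--                     author_list += i['full_name'] + " and "
--                 return author_list[:-5]
--         else:
--             return 'nan'
--     return "nan"
-- ===== SOURCE B (Python) =====
-- def _conj(names):
--     # recursive interleaving: no accumulator, no trailing-separator truncation
--     if not names:
--         return ""
--     head, *rest = names
--     return head if not rest else head + " and " + _conj(rest)
--
--
-- def get_author_list(metadata_arxiv, metadata_doi):
--     meta = metadata_arxiv or metadata_doi
--     if not meta:
--         return "nan"
--     if 'authors' not in meta: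
--         return 'nan'
--     return _conj([a['full_name'] for a in meta['authors']])
-- ===== Notes on version B (the rewrite author's own statement) =====
-- stated objective: simpler
-- what changed: Selects the source once with `metadata_arxiv or metadata_doi` instead of two duplicated elif blocks, extracts the name list in one comprehension, and builds the result by recursive interleaving of ' and ' between names (head + sep + recurse on tail) instead of A's iterative accumulate-'name and '-then-slice-off-5-chars with a len==1 special case.
import Mathlib
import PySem

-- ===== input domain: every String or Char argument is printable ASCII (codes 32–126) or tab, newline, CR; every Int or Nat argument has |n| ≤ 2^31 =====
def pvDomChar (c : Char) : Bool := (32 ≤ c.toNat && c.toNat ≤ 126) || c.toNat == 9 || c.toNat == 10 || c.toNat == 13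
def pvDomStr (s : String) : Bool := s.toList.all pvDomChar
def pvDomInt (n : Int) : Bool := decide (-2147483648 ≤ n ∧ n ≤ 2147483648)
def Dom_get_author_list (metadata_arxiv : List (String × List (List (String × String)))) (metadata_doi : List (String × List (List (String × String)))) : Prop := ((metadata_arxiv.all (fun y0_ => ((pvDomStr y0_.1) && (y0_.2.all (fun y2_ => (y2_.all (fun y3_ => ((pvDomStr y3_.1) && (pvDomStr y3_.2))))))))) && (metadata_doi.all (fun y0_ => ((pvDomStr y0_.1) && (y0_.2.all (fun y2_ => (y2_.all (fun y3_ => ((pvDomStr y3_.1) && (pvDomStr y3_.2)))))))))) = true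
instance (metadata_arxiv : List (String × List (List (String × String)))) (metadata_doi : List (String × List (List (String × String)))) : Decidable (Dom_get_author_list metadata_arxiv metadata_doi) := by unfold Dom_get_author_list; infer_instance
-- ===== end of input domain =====

-- ===== PORT A =====
-- B selects the source once with `or`, extracts names in one pass, and joins them by recursive
-- interleaving of " and " — simpler than A's duplicated blocks with accumulate-then-truncate.
-- Inputs where Python raises KeyError (an author dict without 'full_name' in the selected source) are outside Pre_.

-- full name of one author dict; Python `i['full_name']` (KeyError excluded by Pre_)
def pvFullName (a : List (String × String)) : String :=
  ((PySem.Dict.mk a).get? "full_name").getD ""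

-- A's inner block, identical for both sources in the Python
def pvAuthorsBlockA (authors : List (List (String × String))) : String :=
  if authors.length = 1 then
    pvFullName ((PySem.List.pyGet? authors 0).getD [])
  else
    let cs := authors.foldl (fun acc a => acc ++ (pvFullName a).toList ++ " and ".toList) []
    String.ofList (PySem.List.slice cs none (some (-5)))

def get_author_list (metadata_arxiv : List (String × List (List (String × String)))) (metadata_doi : List (String × List (List (String × String)))) : String :=
  if metadata_arxiv.length ≠ 0 then
    match (PySem.Dict.mk metadata_arxiv).get? "authors" with
    | some authors => pvAuthorsBlockA authors
    | none => "nan"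
  else if metadata_doi.length ≠ 0 then
    match (PySem.Dict.mk metadata_doi).get? "authors" with
    | some authors => pvAuthorsBlockA authors
    | none => "nan"
  else "nan"

-- ===== PORT B =====
-- Source B's _conj: recursive interleaving of " and " between names
def pvConj : List String → String
  | [] => ""
  | [n] => n
  | n :: rest => n ++ " and " ++ pvConj rest

def get_author_list_alt (metadata_arxiv : List (String × List (List (String × String)))) (metadata_doi : List (String × List (List (String × String)))) : String :=
  -- `meta = metadata_arxiv or metadata_doi` (dict truthiness = nonemptiness)
  let src := if metadata_arxiv.length ≠ 0 then metadata_arxiv else metadata_doi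
  if src.length = 0 then "nan"
  else match (PySem.Dict.mk src).get? "authors" with
    | none => "nan"
    | some authors => pvConj (authors.map pvFullName)

-- ===== PRECONDITION & SPEC =====
def pvOkMeta (m : List (String × List (List (String × String)))) : Bool :=
  match (PySem.Dict.mk m).get? "authors" with
  | some authors => authors.all (fun a => (PySem.Dict.mk a).contains "full_name")
  | none => true

-- Pre_ excludes exactly the inputs where Python raises KeyError: the selected (first nonempty)
-- source has an 'authors' list containing an author dict without a 'full_name' key.
def Pre_get_author_list (metadata_arxiv : List (String × List (List (String × String)))) (metadata_doi : List (String × List (List (String × String)))) : Prop :=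
  (if metadata_arxiv.length ≠ 0 then pvOkMeta metadata_arxiv
   else if metadata_doi.length ≠ 0 then pvOkMeta metadata_doi
   else true) = true
instance (metadata_arxiv : List (String × List (List (String × String)))) (metadata_doi : List (String × List (List (String × String)))) : Decidable (Pre_get_author_list metadata_arxiv metadata_doi) := by unfold Pre_get_author_list; infer_instance

def pvWitness_get_author_list : (List (String × List (List (String × String)))) × (List (String × List (List (String × String)))) :=
  ([("authors", [[("full_name", "Alice A")], [("full_name", "Bob B")]])], [])

def Spec_get_author_list (metadata_arxiv : List (String × List (List (String × String)))) (metadata_doi : List (String × List (List (String × String)))) (out : String) : Prop := out = get_author_list_alt metadata_arxiv metadata_doi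
instance (metadata_arxiv : List (String × List (List (String × String)))) (metadata_doi : List (String × List (List (String × String)))) (out : String) : Decidable (Spec_get_author_list metadata_arxiv metadata_doi out) := by unfold Spec_get_author_list; infer_instance

-- ===== CLAIM (what is proved, stated in full; the proofs are below) =====
def Claim_equal_get_author_list : Prop := ∀ (metadata_arxiv : List (String × List (List (String × String)))) (metadata_doi : List (String × List (List (String × String)))), Dom_get_author_list metadata_arxiv metadata_doi → Pre_get_author_list metadata_arxiv metadata_doi → Spec_get_author_list metadata_arxiv metadata_doi (get_author_list metadata_arxiv metadata_doi)

-- ===== LEMMAS AND PROOFS =====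

theorem pvFlatMap_join (sep : List Char) (g : List (String × String) → List Char)
    (p : List (String × String)) (rest : List (List (String × String))) :
    List.flatMap (fun a => g a ++ sep) (p :: rest)
      = PySem.Chars.join sep ((p :: rest).map g) ++ sep := by
  induction rest generalizing p with
  | nil => simp [PySem.Chars.join_singleton]
  | cons q rest ih =>
    have h := ih q
    simp only [List.flatMap_cons] at h ⊢
    rw [List.map_cons, List.map_cons, PySem.Chars.join_cons_cons, ← List.map_cons]
    calc g p ++ sep ++ (g q ++ sep ++ List.flatMap (fun a => g a ++ sep) rest)
        = g p ++ sep ++ (PySem.Chars.join sep (List.map g (q :: rest)) ++ sep) := by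
          rw [← h]
      _ = g p ++ sep ++ PySem.Chars.join sep (List.map g (q :: rest)) ++ sep := by simp

-- A's accumulate-then-truncate block computes the " and "-join of the names
theorem pvBlock_eq_join (authors : List (List (String × String))) :
    pvAuthorsBlockA authors
      = String.ofList (PySem.Chars.join " and ".toList
          ((authors.map pvFullName).map String.toList)) := by
  match authors with
  | [] => decide
  | [a] =>
    simp [pvAuthorsBlockA, PySem.List.pyGet?, PySem.List.pyIdx?, PySem.Chars.join_singleton]
  | a :: b :: rest =>
    have hlen : (a :: b :: rest).length ≠ 1 := by simp
    simp only [pvAuthorsBlockA, hlen]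
    have hfold : List.foldl (fun acc x => acc ++ (pvFullName x).toList ++ " and ".toList)
        ([] : List Char) (a :: b :: rest)
        = List.flatMap (fun x => (pvFullName x).toList ++ " and ".toList) (a :: b :: rest) := by
      have := PySem.List.foldl_append_eq_flatMap
        (fun x => (pvFullName x).toList ++ " and ".toList) (a :: b :: rest) ([] : List Char)
      simpa [List.append_assoc] using this
    rw [hfold, pvFlatMap_join " and ".toList (fun x => (pvFullName x).toList) a (b :: rest)]
    rw [PySem.List.slice_to_neg_ofNat _ 5 (by omega)]
    have hsep : (" and ".toList).length = 5 := by decide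
    set J := PySem.Chars.join " and ".toList
      (List.map (fun x => (pvFullName x).toList) (a :: b :: rest)) with hJ
    have hl : (J ++ " and ".toList).length - 5 = J.length := by
      rw [List.length_append, hsep]; omega
    rw [hl, List.take_left]
    simp only [hJ, List.map_map]
    rfl

-- B's recursive interleaving computes the same join
theorem pvConj_eq_join (ns : List String) :
    pvConj ns = String.ofList (PySem.Chars.join " and ".toList (ns.map String.toList)) := by
  match ns with
  | [] => rfl
  | [n] =>
    simp only [pvConj, List.map_cons, List.map_nil, PySem.Chars.join_singleton]
    exact String.ofList_toList.symm
  | n :: m :: rest =>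
    have ih := pvConj_eq_join (m :: rest)
    show n ++ " and " ++ pvConj (m :: rest) = _
    rw [ih]
    apply String.toList_injective
    simp [PySem.Chars.join_cons_cons]

theorem pvBlock_eq_conj (authors : List (List (String × String))) :
    pvAuthorsBlockA authors = pvConj (authors.map pvFullName) := by
  rw [pvBlock_eq_join, pvConj_eq_join]

-- ===== VERDICT (by name: the statement is the Claim_ definition above) =====
theorem get_author_list_spec : Claim_equal_get_author_list := by
  unfold Claim_equal_get_author_list
  intro ma md _ _
  unfold Spec_get_author_list get_author_list get_author_list_alt
  cases ma with
  | nil =>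
    cases md with
    | nil => rfl
    | cons x xs =>
      simp only [List.length_nil, ne_eq, not_true_eq_false, if_false, List.length_cons]
      cases (PySem.Dict.mk (x :: xs)).get? "authors" with
      | none => simp
      | some authors => simp [pvBlock_eq_conj]
  | cons x xs =>
    simp only [List.length_cons, ne_eq, Nat.succ_ne_zero, not_false_eq_true, if_true]
    cases (PySem.Dict.mk (x :: xs)).get? "authors" with
    | none => simp
    | some authors => simp [pvBlock_eq_conj]
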